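-- pv_equiv track=rewrite | github.com/cyxfff/icache_test | fit/validate_fitted_bench.py | metric_display_order
-- ===== SOURCE A (Python) =====
-- def metric_display_order(target):
--     rate_metrics = [
--         "br_miss_rate",
--         "l1i_miss_rate",
--         "l2i_miss_rate",
--         "l1i_tlb_miss_rate",
--         "l2i_tlb_miss_rate",
--         "l1d_miss_rate",
--         "l2d_miss_rate",
--         "l1d_tlb_miss_rate",
--         "l2d_tlb_miss_rate",
--         "ll_miss_rate",
--     ]
--     other_metrics = [
--         "br_mis_pred_mpki",
--         "br_retired_mpki",
--         "l1i_cache_mpki",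
--         "l1i_cache_refill_mpki",
--         "l2i_cache_mpki",
--         "l2i_cache_refill_mpki",
--         "l1i_tlb_mpki",
--         "l1i_tlb_refill_mpki",
--         "l2i_tlb_mpki",
--         "l2i_tlb_refill_mpki",
--         "l1d_cache_mpki",
--         "l1d_cache_refill_mpki",
--         "l2d_cache_mpki",
--         "l2d_cache_refill_mpki",
--         "l1d_tlb_mpki",
--         "l1d_tlb_refill_mpki",
--         "l2d_tlb_mpki",
--         "l2d_tlb_refill_mpki",
--         "ll_cache_mpki",
--         "ll_cache_miss_mpki",
--         "ipc",
--         "instructions:u",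
--     ]
--     ordered = [metric for metric in rate_metrics + other_metrics if metric in target]
--     for metric in target:
--         if metric not in ordered:
--             ordered.append(metric)
--     return ordered
-- ===== SOURCE B (Python) =====
-- def metric_display_order(target):
--     stems = ["br", "l1i", "l2i", "l1i_tlb", "l2i_tlb",
--              "l1d", "l2d", "l1d_tlb", "l2d_tlb", "ll"]
--     rate_metrics = [s + "_miss_rate" for s in stems]
--     units = ["l1i_cache", "l2i_cache", "l1i_tlb", "l2i_tlb",
--              "l1d_cache", "l2d_cache", "l1d_tlb", "l2d_tlb"]
--     other_metrics = ["br_mis_pred_mpki", "br_retired_mpki"]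
--     for u in units:
--         other_metrics += [u + "_mpki", u + "_refill_mpki"]
--     other_metrics += ["ll_cache_mpki", "ll_cache_miss_mpki", "ipc", "instructions:u"]
--     predefined = rate_metrics + other_metrics
--     rank = {m: i for i, m in enumerate(predefined)}
--     return sorted(dict.fromkeys(target), key=lambda m: rank.get(m, len(predefined)))
-- ===== Notes on version B (the rewrite author's own statement) =====
-- stated objective: faster
-- what changed: Replaces A's two explicit scans (filter of the predefined literal list against target, then a quadratic append-if-absent loop over target) by generating the predefined metric names from short stems, building a rank dictionary once, and returning the deduplicated target stably sorted by rank (unknown metrics get the constant key len(predefined)).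
import Mathlib
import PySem

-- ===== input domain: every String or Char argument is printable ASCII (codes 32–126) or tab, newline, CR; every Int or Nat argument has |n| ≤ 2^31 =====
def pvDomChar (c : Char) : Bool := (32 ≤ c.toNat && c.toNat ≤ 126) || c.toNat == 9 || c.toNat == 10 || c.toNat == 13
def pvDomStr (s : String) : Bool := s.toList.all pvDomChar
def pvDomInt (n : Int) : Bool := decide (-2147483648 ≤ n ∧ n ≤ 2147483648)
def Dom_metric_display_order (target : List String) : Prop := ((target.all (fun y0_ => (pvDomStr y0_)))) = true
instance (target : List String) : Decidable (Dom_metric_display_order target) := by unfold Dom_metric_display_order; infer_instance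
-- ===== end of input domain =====

-- B generates the predefined metric names from stems, builds a rank dictionary once, and returns the
-- deduplicated target stably sorted by rank, instead of A's filter pass plus quadratic dedup-append
-- loop (objective: faster, measured).

-- ===== PORT A =====
def pvA_rate : List String := ["br_miss_rate", "l1i_miss_rate", "l2i_miss_rate", "l1i_tlb_miss_rate", "l2i_tlb_miss_rate", "l1d_miss_rate", "l2d_miss_rate", "l1d_tlb_miss_rate", "l2d_tlb_miss_rate", "ll_miss_rate"]
def pvA_other : List String := ["br_mis_pred_mpki", "br_retired_mpki", "l1i_cache_mpki", "l1i_cache_refill_mpki", "l2i_cache_mpki", "l2i_cache_refill_mpki", "l1i_tlb_mpki", "l1i_tlb_refill_mpki", "l2i_tlb_mpki", "l2i_tlb_refill_mpki", "l1d_cache_mpki", "l1d_cache_refill_mpki", "l2d_cache_mpki", "l2d_cache_refill_mpki", "l1d_tlb_mpki", "l1d_tlb_refill_mpki", "l2d_tlb_mpki", "l2d_tlb_refill_mpki", "ll_cache_mpki", "ll_cache_miss_mpki", "ipc", "instructions:u"]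

def metric_display_order (target : List String) : List String :=
  -- ordered = [metric for metric in rate_metrics + other_metrics if metric in target]
  let ordered := (pvA_rate ++ pvA_other).filter (fun m => target.contains m)
  -- for metric in target: if metric not in ordered: ordered.append(metric)
  target.foldl (fun acc m => if acc.contains m then acc else acc ++ [m]) ordered

-- ===== PORT B =====
-- stems / units, and the predefined names generated from them (as in Source B)
def pvB_stems : List String := ["br", "l1i", "l2i", "l1i_tlb", "l2i_tlb", "l1d", "l2d", "l1d_tlb", "l2d_tlb", "ll"]
def pvB_units : List String := ["l1i_cache", "l2i_cache", "l1i_tlb", "l2i_tlb", "l1d_cache", "l2d_cache", "l1d_tlb", "l2d_tlb"]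
def pvB_rate : List String := pvB_stems.map (fun s => s ++ "_miss_rate")
def pvB_other : List String :=
  ["br_mis_pred_mpki", "br_retired_mpki"]
    ++ pvB_units.flatMap (fun u => [u ++ "_mpki", u ++ "_refill_mpki"])
    ++ ["ll_cache_mpki", "ll_cache_miss_mpki", "ipc", "instructions:u"]
-- predefined = rate_metrics + other_metrics
def pvB_pre : List String := pvB_rate ++ pvB_other
-- rank = {m: i for i, m in enumerate(predefined)}
def pvB_rank : PySem.Dict String Int :=
  (PySem.List.enumerate pvB_pre).foldl (fun d p => d.insert p.2 p.1) PySem.Dict.empty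
-- lambda m: rank.get(m, len(predefined))
def pvKey (m : String) : Int := PySem.Dict.getD pvB_rank m ((pvB_pre.length : Int))

def metric_display_order_alt (target : List String) : List String :=
  -- sorted(dict.fromkeys(target), key=lambda m: rank.get(m, len(predefined)))
  PySem.List.sorted (PySem.List.dedup target) pvKey false

-- ===== PRECONDITION & SPEC =====
def Spec_metric_display_order (target : List String) (out : List String) : Prop := out = metric_display_order_alt target
instance (target : List String) (out : List String) : Decidable (Spec_metric_display_order target out) := by unfold Spec_metric_display_order; infer_instance

-- ===== CLAIM (what is proved, stated in full; the proofs are below) =====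
def Claim_equal_metric_display_order : Prop := ∀ (target : List String), Dom_metric_display_order target → Spec_metric_display_order target (metric_display_order target)

-- ===== LEMMAS AND PROOFS =====

-- B's generated predefined list coincides with A's literal one
theorem pvB_pre_eq : pvA_rate ++ pvA_other = pvB_pre := by decide

-- the rank keys of the predefined metrics, in order
theorem pvKey_map : pvB_pre.map pvKey = [0, 1, 2, 3, 4, 5, 6, 7, 8, 9, 10, 11, 12, 13, 14, 15, 16, 17, 18, 19, 20, 21, 22, 23, 24, 25, 26, 27, 28, 29, 30, 31] := by decide

-- a metric outside the predefined list gets the default key 32 = len(predefined)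
theorem pvKey_notmem (x : String) (h : x ∉ pvB_pre) : pvKey x = 32 := by
  have hfst : pvB_rank.items.map Prod.fst = pvB_pre := by decide
  have hfind : List.find? (fun p => p.1 == x) pvB_rank.items = none := by
    apply List.find?_eq_none.mpr
    intro p hp
    simp only [beq_iff_eq]
    intro he
    apply h
    rw [← hfst]
    exact he ▸ List.mem_map_of_mem hp
  simp [pvKey, PySem.Dict.getD, PySem.Dict.get?, hfind]
  decide

theorem pvKey_mem_lt (x : String) (h : x ∈ pvB_pre) : pvKey x < 32 := by
  have hm : pvKey x ∈ pvB_pre.map pvKey := List.mem_map_of_mem h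
  rw [pvKey_map] at hm
  simp only [List.mem_cons, List.mem_singleton, List.not_mem_nil, or_false] at hm
  rcases hm with h|h|h|h|h|h|h|h|h|h|h|h|h|h|h|h|h|h|h|h|h|h|h|h|h|h|h|h|h|h|h|h <;> omega

theorem pvKey_pairwise : List.Pairwise (fun a b => pvKey a < pvKey b) pvB_pre := by
  have := (List.pairwise_map (l := pvB_pre) (f := pvKey) (R := fun a b : Int => a < b)).mp
  apply this
  rw [pvKey_map]
  decide

-- inserting x into l1 ++ l2 where everything in l1 is not-after x and everything in l2 is after x
theorem insertBy_split (before : String → String → Bool) (x : String) (l1 l2 : List String)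
    (h1 : ∀ y ∈ l1, before x y = false) (h2 : ∀ y ∈ l2, before x y = true) :
    PySem.List.insertBy before x (l1 ++ l2) = l1 ++ x :: l2 := by
  induction l1 with
  | nil =>
    cases l2 with
    | nil => rfl
    | cons y t =>
      have hy := h2 y (List.mem_cons_self)
      simp [PySem.List.insertBy, hy]
  | cons a l1' ih =>
    have ha := h1 a (List.mem_cons_self)
    simp [PySem.List.insertBy, ha, ih (fun y hy => h1 y (List.mem_cons_of_mem _ hy))]

-- stable sort under a "ranked bucket" key splits into the ranked part (in rank order) and the rest (in order)
theorem sorted_buckets (P : List String) (k : String → Int)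
    (hP : List.Pairwise (fun a b => k a < k b) P)
    (hU : ∀ x ∈ P, ∀ y, y ∉ P → k x < k y)
    (hUU : ∀ x y, x ∉ P → y ∉ P → ¬ k x < k y)
    (ys : List String) (hnd : ys.Nodup) :
    PySem.List.sorted ys k false =
      P.filter (fun p => ys.contains p) ++ ys.filter (fun y => !P.contains y) := by
  induction ys using List.reverseRecOn with
  | nil => simp [PySem.List.sorted]
  | append_singleton xs x ih =>
    rw [List.nodup_append] at hnd
    obtain ⟨hxs, -, hne⟩ := hnd
    have hx : x ∉ xs := by
      intro hmem
      exact hne x hmem x (List.mem_cons_self) rfl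
    have hsort : PySem.List.sorted (xs ++ [x]) k false =
        PySem.List.insertBy (fun a b => decide (k a < k b)) x (PySem.List.sorted xs k false) := by
      rw [PySem.List.sorted_eq_foldl_insertBy, PySem.List.sorted_eq_foldl_insertBy, List.foldl_append]
      rfl
    rw [hsort, ih hxs]
    by_cases hxP : x ∈ P
    · -- x is a predefined metric: insert it between its rank neighbours
      obtain ⟨P1, P2, rfl⟩ := List.append_of_mem hxP
      rw [List.pairwise_append] at hP
      obtain ⟨hP1, hP2', hcross⟩ := hP
      have hk1 : ∀ y ∈ P1, k y < k x := fun y hy => hcross y hy x (List.mem_cons_self)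
      have hk2 : ∀ y ∈ P2, k x < k y := (List.pairwise_cons.mp hP2').1
      have hfilt : (P1 ++ x :: P2).filter (fun p => xs.contains p) =
          P1.filter (fun p => xs.contains p) ++ P2.filter (fun p => xs.contains p) := by
        rw [List.filter_append, List.filter_cons]
        rw [if_neg (fun hc => hx (List.contains_iff_mem.mp hc))]
      rw [hfilt, List.append_assoc]
      rw [insertBy_split (fun a b => decide (k a < k b)) x
            (P1.filter (fun p => xs.contains p))
            (P2.filter (fun p => xs.contains p) ++ xs.filter (fun y => !(P1 ++ x :: P2).contains y))
            (by
              intro y hy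
              have := hk1 y (List.mem_filter.mp hy).1
              simp only [decide_eq_false_iff_not]
              omega)
            (by
              intro y hy
              rcases List.mem_append.mp hy with hy1 | hy2
              · have := hk2 y (List.mem_filter.mp hy1).1
                simpa using this
              · have hyP : y ∉ (P1 ++ x :: P2) := by
                  have := (List.mem_filter.mp hy2).2
                  simpa [List.contains_iff_mem] using this
                have := hU x hxP y hyP
                simpa using this)]
      -- rewrite the right-hand side into the same shape
      have hne1 : ∀ p ∈ P1, p ≠ x := by
        intro p hp heq
        exact absurd (hk1 p hp) (by rw [heq]; omega)
      have hne2 : ∀ p ∈ P2, p ≠ x := by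
        intro p hp heq
        exact absurd (hk2 p hp) (by rw [heq]; omega)
      have hR1 : P1.filter (fun p => (xs ++ [x]).contains p) = P1.filter (fun p => xs.contains p) :=
        List.filter_congr (by
          intro p hp
          simp [List.contains_iff_mem, List.mem_append, hne1 p hp])
      have hR2 : P2.filter (fun p => (xs ++ [x]).contains p) = P2.filter (fun p => xs.contains p) :=
        List.filter_congr (by
          intro p hp
          simp [List.contains_iff_mem, List.mem_append, hne2 p hp])
      rw [List.filter_append, List.filter_cons, List.filter_append, hR1, hR2]
      rw [if_pos (List.contains_iff_mem.mpr (List.mem_append.mpr (Or.inr List.mem_cons_self)))]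
      have hxdrop : [x].filter (fun y => !(P1 ++ x :: P2).contains y) = [] := by
        simp [List.contains_iff_mem]
      rw [hxdrop, List.append_nil]
      simp
    · -- x is an unknown metric: it goes to the very end
      rw [PySem.List.insertBy_of_forall_not_before _ _ _ (by
        intro y hy
        rcases List.mem_append.mp hy with hy1 | hy2
        · have hyP := (List.mem_filter.mp hy1).1
          have := hU y hyP x hxP
          simp only [decide_eq_false_iff_not]
          omega
        · have hyP : y ∉ P := by
            have := (List.mem_filter.mp hy2).2
            simpa [List.contains_iff_mem] using this
          simpa using hUU x y hxP hyP)]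
      have hR1 : P.filter (fun p => (xs ++ [x]).contains p) = P.filter (fun p => xs.contains p) :=
        List.filter_congr (by
          intro p hp
          have : p ≠ x := fun h => hxP (h ▸ hp)
          simp [List.contains_iff_mem, List.mem_append, this])
      rw [hR1, List.filter_append]
      have hxkeep : [x].filter (fun y => !P.contains y) = [x] := by
        simp [List.contains_iff_mem, hxP]
      rw [hxkeep, List.append_assoc]

-- dedup of a right-extended list
theorem dedup_append_singleton (xs : List String) (x : String) :
    PySem.List.dedup (xs ++ [x]) =
      if x ∈ PySem.List.dedup xs then PySem.List.dedup xs else PySem.List.dedup xs ++ [x] := by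
  simp only [PySem.List.dedup_eq_ofList, PySem.Set.ofList, List.foldl_append, List.foldl_cons,
    List.foldl_nil, PySem.Set.add]
  by_cases h : x ∈ List.foldl PySem.Set.add PySem.Set.empty xs
  · rw [if_pos (by simpa [List.contains_iff_mem] using h), if_pos h]
  · rw [if_neg (by simpa [List.contains_iff_mem] using h), if_neg h]

-- A's append loop, characterised: it adds the unknown metrics of pre, deduplicated, at the end
theorem foldA (P : List String) (target0 : List String) (pre : List String)
    (hsub : ∀ m ∈ pre, m ∈ target0) :
    pre.foldl (fun acc m => if acc.contains m then acc else acc ++ [m])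
        (P.filter (fun p => target0.contains p))
      = P.filter (fun p => target0.contains p) ++
          (PySem.List.dedup pre).filter (fun y => !P.contains y) := by
  induction pre using List.reverseRecOn with
  | nil => simp [PySem.List.dedup, PySem.Set.ofList]
  | append_singleton xs x ih =>
    have hsub' : ∀ m ∈ xs, m ∈ target0 := fun m hm => hsub m (List.mem_append.mpr (Or.inl hm))
    have hxT : x ∈ target0 := hsub x (List.mem_append.mpr (Or.inr (List.mem_cons_self)))
    rw [List.foldl_append, List.foldl_cons, List.foldl_nil, ih hsub']
    by_cases hc : x ∈ P.filter (fun p => target0.contains p) ++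
        (PySem.List.dedup xs).filter (fun y => !P.contains y)
    · rw [if_pos (by simpa [List.contains_iff_mem] using hc)]
      rcases List.mem_append.mp hc with h1 | h2
      · -- x is predefined: the dedup-filter part cannot change
        have hxP : x ∈ P := (List.mem_filter.mp h1).1
        rw [dedup_append_singleton]
        by_cases hdx : x ∈ PySem.List.dedup xs
        · rw [if_pos hdx]
        · rw [if_neg hdx, List.filter_append]
          have : [x].filter (fun y => !P.contains y) = [] := by
            simp [List.contains_iff_mem, hxP]
          rw [this, List.append_nil]
      · -- x already seen among the unknowns
        have hdx : x ∈ PySem.List.dedup xs := (List.mem_filter.mp h2).1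
        rw [dedup_append_singleton, if_pos hdx]
    · rw [if_neg (by simpa [List.contains_iff_mem] using hc)]
      have hxP : x ∉ P := by
        intro hxP
        exact hc (List.mem_append.mpr (Or.inl (List.mem_filter.mpr
          ⟨hxP, by simpa [List.contains_iff_mem] using hxT⟩)))
      have hdx : x ∉ PySem.List.dedup xs := by
        intro hdx
        exact hc (List.mem_append.mpr (Or.inr (List.mem_filter.mpr
          ⟨hdx, by simpa [List.contains_iff_mem] using hxP⟩)))
      rw [dedup_append_singleton, if_neg hdx, List.filter_append]
      have : [x].filter (fun y => !P.contains y) = [x] := by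
        simp [List.contains_iff_mem, hxP]
      rw [this, List.append_assoc]

-- ===== VERDICT (by name: the statement is the Claim_ definition above) =====
theorem metric_display_order_spec : Claim_equal_metric_display_order := by
  intro target _
  unfold Spec_metric_display_order metric_display_order metric_display_order_alt
  rw [pvB_pre_eq]
  rw [foldA pvB_pre target target (fun m hm => hm)]
  rw [sorted_buckets pvB_pre pvKey pvKey_pairwise
        (fun x hx y hy => by
          have h1 := pvKey_mem_lt x hx
          have h2 := pvKey_notmem y hy
          omega)
        (fun x y hx hy => by
          rw [pvKey_notmem x hx, pvKey_notmem y hy]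
          omega)
        (PySem.List.dedup target) (PySem.List.nodup_dedup target)]
  have hfilt : pvB_pre.filter (fun p => (PySem.List.dedup target).contains p) =
      pvB_pre.filter (fun p => target.contains p) :=
    List.filter_congr (by
      intro p _
      simp [List.contains_iff_mem, PySem.List.mem_dedup])
  rw [hfilt]
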